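-- pv_equiv track=rewrite | github.com/spraldev/comp-prog | stuff/x.py | slow
-- ===== SOURCE A (Python) =====
-- def slow(S):
--     ste = set()
--
--     for i in range(len(S)):
--         for j in range(i + 1, len(S)):
--             cop = S.copy()
--
--             temp = cop[i]
--             cop[i] = cop[j]
--             cop[j] = temp
--
--             ste.add(tuple(cop))
--
--     return len(ste)
-- ===== SOURCE B (Python) =====
-- def slow(S):
--     total = 0   # number of index pairs i < j
--     same = 0    # number of pairs i < j with S[i] == S[j]
--     seen = {}   # value -> how many times it occurred so far
--     for j, v in enumerate(S):
--         total += j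
--         same += seen.get(v, 0)
--         seen[v] = seen.get(v, 0) + 1
--     return total - same + (1 if same != 0 else 0)
-- ===== Notes on version B (the rewrite author's own statement) =====
-- stated objective: faster
-- what changed: B replaces A's enumeration of all O(n^2) swapped copies (each an O(n) list stored in a set) by a single pass that counts, with a running value-frequency dictionary, the index pairs with equal values: distinct results = C(n,2) - equal pairs + (1 if any equal pair).
import Mathlib
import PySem

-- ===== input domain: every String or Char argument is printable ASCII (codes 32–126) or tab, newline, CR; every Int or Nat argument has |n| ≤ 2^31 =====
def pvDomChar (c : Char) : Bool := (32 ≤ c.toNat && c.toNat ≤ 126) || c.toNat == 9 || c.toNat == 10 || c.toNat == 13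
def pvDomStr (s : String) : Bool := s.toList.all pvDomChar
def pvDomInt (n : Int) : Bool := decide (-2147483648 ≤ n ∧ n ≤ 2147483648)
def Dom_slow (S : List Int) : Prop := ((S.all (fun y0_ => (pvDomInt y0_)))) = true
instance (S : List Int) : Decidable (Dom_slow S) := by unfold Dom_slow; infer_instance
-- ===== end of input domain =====

-- B replaces A's cubic enumeration of all swapped copies by a one-pass count of
-- equal/unequal index pairs via a running frequency dictionary (objective: faster).

-- ===== PORT A =====
def slow (S : List Int) : Int :=
  let ste : PySem.Set (List Int) :=
    (PySem.List.pyRange 0 (PySem.List.len S) 1).foldl (fun st i =>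
      (PySem.List.pyRange (i + 1) (PySem.List.len S) 1).foldl (fun st j =>
        let cop := S
        let temp := PySem.List.pyGetD cop i 0
        let cop := PySem.List.pySetD cop i (PySem.List.pyGetD cop j 0)
        let cop := PySem.List.pySetD cop j temp
        PySem.Set.add st cop) st) PySem.Set.empty
  PySem.Set.len ste

-- ===== PORT B =====
def slow_alt (S : List Int) : Int :=
  let st := (PySem.List.enumerate S).foldl
    (fun (acc : Int × Int × PySem.Dict Int Int) jv =>
      (acc.1 + jv.1, acc.2.1 + acc.2.2.getD jv.2 0,
       acc.2.2.insert jv.2 (acc.2.2.getD jv.2 0 + 1)))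
    (0, 0, PySem.Dict.empty)
  st.1 - st.2.1 + (if st.2.1 ≠ 0 then 1 else 0)

-- ===== PRECONDITION & SPEC =====
def Spec_slow (S : List Int) (out : Int) : Prop := out = slow_alt S
instance (S : List Int) (out : Int) : Decidable (Spec_slow S out) := by unfold Spec_slow; infer_instance

-- ===== CLAIM (what is proved, stated in full; the proofs are below) =====
def Claim_equal_slow : Prop := ∀ (S : List Int), Dom_slow S → Spec_slow S (slow S)

-- ===== LEMMAS AND PROOFS =====

-- the swapped copy A builds for a pair of Nat indices
def pvSw (S : List Int) (i j : Nat) : List Int :=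
  (S.set i (S.getD j 0)).set j (S.getD i 0)

-- the set of index pairs i < j < |S|
def pvPairs (S : List Int) : Finset (Nat × Nat) :=
  (Finset.range S.length ×ˢ Finset.range S.length).filter (fun p => p.1 < p.2)

-- Σ_j (#equal earlier partners of position j): B's "same" counter, as a Nat
def pvEqc (S : List Int) : Nat :=
  ∑ j ∈ Finset.range S.length,
    ((Finset.range j).filter (fun i => S.getD i 0 = S.getD j 0)).card

-- A's inner-loop body, named
def pvBody (S : List Int) (i j : Int) : List Int :=
  PySem.List.pySetD (PySem.List.pySetD S i (PySem.List.pyGetD S j 0)) j (PySem.List.pyGetD S i 0)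

theorem pvBody_eq_sw (S : List Int) (i j : Int) (hi : 0 ≤ i) (hj : 0 ≤ j) :
    pvBody S i j = pvSw S i.toNat j.toNat := by
  unfold pvBody pvSw
  rw [show i = ((i.toNat : Nat) : Int) from (Int.toNat_of_nonneg hi).symm,
      show j = ((j.toNat : Nat) : Int) from (Int.toNat_of_nonneg hj).symm]
  simp only [PySem.List.pySetD_natCast, PySem.List.pyGetD_natCast, Int.toNat_natCast]

theorem pv_mem_inner (S : List Int) (i : Int) (st : PySem.Set (List Int)) (x : List Int) :
    x ∈ (PySem.List.pyRange (i + 1) (PySem.List.len S) 1).foldl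
        (fun st j => PySem.Set.add st (pvBody S i j)) st
      ↔ x ∈ st ∨ ∃ j ∈ PySem.List.pyRange (i + 1) (PySem.List.len S) 1, x = pvBody S i j :=
  PySem.Set.mem_foldl_add _ _ _ _

theorem pv_mem_outer (S : List Int) (L : List Int) (st : PySem.Set (List Int)) (x : List Int) :
    x ∈ L.foldl (fun st i =>
        (PySem.List.pyRange (i + 1) (PySem.List.len S) 1).foldl
          (fun st j => PySem.Set.add st (pvBody S i j)) st) st
      ↔ x ∈ st ∨ ∃ i ∈ L, ∃ j ∈ PySem.List.pyRange (i + 1) (PySem.List.len S) 1, x = pvBody S i j := by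
  induction L generalizing st with
  | nil => simp
  | cons a L ih =>
      simp only [List.foldl_cons, ih, pv_mem_inner, List.mem_cons]
      constructor
      · rintro (((h | ⟨j, hj, rfl⟩) ) | ⟨i, hi, j, hj, rfl⟩)
        · exact Or.inl h
        · exact Or.inr ⟨a, Or.inl rfl, j, hj, rfl⟩
        · exact Or.inr ⟨i, Or.inr hi, j, hj, rfl⟩
      · rintro (h | ⟨i, (rfl | hi), j, hj, rfl⟩)
        · exact Or.inl (Or.inl h)
        · exact Or.inl (Or.inr ⟨j, hj, rfl⟩)
        · exact Or.inr ⟨i, hi, j, hj, rfl⟩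

theorem pv_nodup_foldl_add {β : Type} (l : List β) (f : β → List Int) (s : PySem.Set (List Int))
    (h : s.Nodup) : (l.foldl (fun s b => PySem.Set.add s (f b)) s).Nodup := by
  induction l generalizing s with
  | nil => exact h
  | cons a l ih => exact ih _ (PySem.Set.nodup_add _ _ h)

theorem pv_nodup_outer (S : List Int) (L : List Int) (st : PySem.Set (List Int)) (h : st.Nodup) :
    (L.foldl (fun st i =>
        (PySem.List.pyRange (i + 1) (PySem.List.len S) 1).foldl
          (fun st j => PySem.Set.add st (pvBody S i j)) st) st).Nodup := by
  induction L generalizing st with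
  | nil => exact h
  | cons a L ih => exact ih _ (pv_nodup_foldl_add _ _ _ h)

-- the set A returns, named
def pvSte (S : List Int) : PySem.Set (List Int) :=
  (PySem.List.pyRange 0 (PySem.List.len S) 1).foldl (fun st i =>
    (PySem.List.pyRange (i + 1) (PySem.List.len S) 1).foldl
      (fun st j => PySem.Set.add st (pvBody S i j)) st) PySem.Set.empty

theorem pv_slow_eq (S : List Int) : slow S = (pvSte S).length := by
  rfl

theorem pv_mem_ste (S : List Int) (x : List Int) :
    x ∈ pvSte S ↔ ∃ p ∈ pvPairs S, x = pvSw S p.1 p.2 := by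
  rw [pvSte, pv_mem_outer]
  simp only [PySem.Set.empty, List.not_mem_nil, false_or, PySem.List.mem_pyRange_one,
    PySem.List.len_eq, pvPairs, Finset.mem_filter, Finset.mem_product, Finset.mem_range]
  constructor
  · rintro ⟨i, ⟨hi0, hin⟩, j, ⟨hij, hjn⟩, rfl⟩
    refine ⟨(i.toNat, j.toNat), ⟨⟨?_, ?_⟩, ?_⟩, (pvBody_eq_sw S i j hi0 (by omega)).symm ▸ rfl⟩
    all_goals omega
  · rintro ⟨⟨a, b⟩, ⟨⟨han, hbn⟩, hab⟩, rfl⟩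
    refine ⟨(a : Int), ⟨by omega, by omega⟩, (b : Int), ⟨by omega, by omega⟩, ?_⟩
    rw [pvBody_eq_sw S _ _ (by omega) (by omega)]
    simp

theorem pv_slow_eq_card (S : List Int) :
    slow S = (((pvPairs S).image (fun p => pvSw S p.1 p.2)).card : Int) := by
  rw [pv_slow_eq]
  have hnd : (pvSte S).Nodup := pv_nodup_outer S _ _ (by simp [PySem.Set.empty])
  have h1 : (pvSte S).length = (pvSte S).toFinset.card := (List.toFinset_card_of_nodup hnd).symm
  have h2 : (pvSte S).toFinset = (pvPairs S).image (fun p => pvSw S p.1 p.2) := by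
    ext x
    simp only [List.mem_toFinset, pv_mem_ste, Finset.mem_image]
    constructor
    · rintro ⟨p, hp, rfl⟩; exact ⟨p, hp, rfl⟩
    · rintro ⟨p, hp, rfl⟩; exact ⟨p, hp, rfl⟩
  rw [h1, h2]

theorem pv_getD_eq (S : List Int) (n : Nat) (h : n < S.length) : S.getD n 0 = S[n] := by
  simp [List.getD_eq_getElem?_getD, List.getElem?_eq_getElem h]

theorem pv_getElem_sw (S : List Int) (i j m : Nat) (hm : m < S.length) :
    (pvSw S i j)[m]'(by simpa [pvSw] using hm) =
      if m = j then S.getD i 0 else if m = i then S.getD j 0 else S.getD m 0 := by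
  unfold pvSw
  rw [List.getElem_set, List.getElem_set]
  by_cases hmj : m = j
  · rw [if_pos hmj.symm, if_pos hmj]
  · rw [if_neg (fun h => hmj h.symm), if_neg hmj]
    by_cases hmi : m = i
    · rw [if_pos hmi.symm, if_pos hmi]
    · rw [if_neg (fun h => hmi h.symm), if_neg hmi, pv_getD_eq S m hm]

theorem pv_sw_eq_self_iff (S : List Int) (i j : Nat) (hij : i < j) (hj : j < S.length) :
    pvSw S i j = S ↔ S.getD i 0 = S.getD j 0 := by
  have hi : i < S.length := lt_trans hij hj
  constructor
  · intro h
    have h2 := congrArg (fun L => L.getD i (0 : Int)) h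
    simp only at h2
    rw [List.getD_eq_getElem?_getD, List.getElem?_eq_getElem (by simpa [pvSw] using hi),
      Option.getD_some, pv_getElem_sw S i j i hi, if_neg (by omega), if_pos rfl,
      pv_getD_eq S i hi] at h2
    rw [pv_getD_eq S i hi, pv_getD_eq S j hj]
    rw [pv_getD_eq S j hj] at h2
    exact h2.symm
  · intro h
    apply List.ext_getElem (by simp [pvSw])
    intro m hm hm'
    rw [pv_getElem_sw S i j m hm']
    by_cases hmj : m = j
    · subst hmj
      rw [if_pos rfl, h, pv_getD_eq S m hm']
    · rw [if_neg hmj]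
      by_cases hmi : m = i
      · rw [if_pos hmi]; subst hmi
        rw [← pv_getD_eq S m hm', h]
      · rw [if_neg hmi, pv_getD_eq S m hm']

theorem pv_sw_inj (S : List Int) (i j k l : Nat) (hij : i < j) (hj : j < S.length)
    (hkl : k < l) (hl : l < S.length) (hne : S.getD i 0 ≠ S.getD j 0)
    (h : pvSw S i j = pvSw S k l) : i = k ∧ j = l := by
  have _hl := hl
  have hg : ∀ m, m < S.length →
      (if m = j then S.getD i 0 else if m = i then S.getD j 0 else S.getD m 0)
      = (if m = l then S.getD k 0 else if m = k then S.getD l 0 else S.getD m 0) := by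
    intro m hm
    rw [← pv_getElem_sw S i j m hm, ← pv_getElem_sw S k l m hm, List.getElem_of_eq h]
  have h1 : i = k ∨ i = l := by
    by_contra hc
    push Not at hc
    have hx := hg i (by omega)
    rw [if_neg (by omega), if_pos rfl, if_neg hc.2, if_neg hc.1] at hx
    exact hne hx.symm
  have h2 : j = k ∨ j = l := by
    by_contra hc
    push Not at hc
    have hx := hg j (by omega)
    rw [if_pos rfl, if_neg hc.2, if_neg hc.1] at hx
    exact hne hx
  refine ⟨?_, ?_⟩ <;> (rcases h1 with h1 | h1 <;> rcases h2 with h2 | h2 <;> omega)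

theorem pv_card_pairs (S : List Int) (q : Nat → Nat → Prop) [∀ i j, Decidable (q i j)] :
    ((pvPairs S).filter (fun p => q p.1 p.2)).card
      = ∑ j ∈ Finset.range S.length, ((Finset.range j).filter (fun i => q i j)).card := by
  rw [Finset.card_eq_sum_card_fiberwise (f := Prod.snd) (t := Finset.range S.length)
    (by intro p hp; simp only [pvPairs, Finset.mem_coe, Finset.mem_filter, Finset.mem_product] at hp
        simpa using hp.1.1.2)]
  refine Finset.sum_congr rfl ?_
  intro j hj
  rw [Finset.mem_range] at hj
  rw [show ({p ∈ (pvPairs S).filter (fun p => q p.1 p.2) | p.2 = j} : Finset (Nat × Nat))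
      = ((Finset.range j).filter (fun i => q i j)).image (fun i => (i, j)) from ?_]
  · rw [Finset.card_image_of_injective _ (fun a b hab => (Prod.mk.injEq _ _ _ _).mp hab |>.1)]
  · ext ⟨a, b⟩
    simp only [pvPairs, Finset.mem_filter, Finset.mem_product, Finset.mem_range,
      Finset.mem_image, Prod.mk.injEq]
    constructor
    · rintro ⟨⟨⟨⟨ha, hb⟩, hab⟩, hq⟩, rfl⟩
      exact ⟨a, ⟨hab, hq⟩, rfl, rfl⟩
    · rintro ⟨i, ⟨hi, hq⟩, rfl, rfl⟩
      exact ⟨⟨⟨⟨by omega, hj⟩, hi⟩, hq⟩, rfl⟩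

theorem pv_card_image (S : List Int) :
    ((pvPairs S).image (fun p => pvSw S p.1 p.2)).card
      = ((pvPairs S).filter (fun p => S.getD p.1 0 ≠ S.getD p.2 0)).card
        + (if ((pvPairs S).filter (fun p => S.getD p.1 0 = S.getD p.2 0)).Nonempty then 1 else 0) := by
  classical
  set g := fun p : Nat × Nat => pvSw S p.1 p.2 with hgdef
  set Pe := (pvPairs S).filter (fun p => S.getD p.1 0 = S.getD p.2 0) with hPe
  set Pn := (pvPairs S).filter (fun p => S.getD p.1 0 ≠ S.getD p.2 0) with hPn
  have hmemPairs : ∀ p ∈ pvPairs S, p.1 < p.2 ∧ p.2 < S.length := by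
    intro p hp
    simp only [pvPairs, Finset.mem_filter, Finset.mem_product, Finset.mem_range] at hp
    exact ⟨hp.2, hp.1.2⟩
  have himgPe : ∀ x ∈ Pe.image g, x = S := by
    intro x hx
    rcases Finset.mem_image.mp hx with ⟨p, hp, rfl⟩
    have h1 := Finset.mem_filter.mp hp
    have h2 := hmemPairs p h1.1
    exact (pv_sw_eq_self_iff S p.1 p.2 h2.1 h2.2).mpr h1.2
  have hSnot : S ∉ Pn.image g := by
    intro hx
    rcases Finset.mem_image.mp hx with ⟨p, hp, hps⟩
    have h1 := Finset.mem_filter.mp hp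
    have h2 := hmemPairs p h1.1
    exact h1.2 ((pv_sw_eq_self_iff S p.1 p.2 h2.1 h2.2).mp hps)
  have hunion : Pe ∪ Pn = pvPairs S := Finset.filter_union_filter_neg_eq _ _
  have himg : (pvPairs S).image g = Pn.image g ∪ Pe.image g := by
    rw [← hunion, Finset.image_union]
    exact Finset.union_comm _ _
  have hdisj : Disjoint (Pn.image g) (Pe.image g) := by
    rw [Finset.disjoint_left]
    intro a ha hb
    exact hSnot (himgPe a hb ▸ ha)
  rw [himg, Finset.card_union_of_disjoint hdisj]
  congr 1
  · apply Finset.card_image_of_injOn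
    intro p hp q hq hpq
    have h1 := Finset.mem_filter.mp hp
    have h2 := Finset.mem_filter.mp hq
    have h3 := hmemPairs p h1.1
    have h4 := hmemPairs q h2.1
    have := pv_sw_inj S p.1 p.2 q.1 q.2 h3.1 h3.2 h4.1 h4.2 h1.2 hpq
    exact Prod.ext this.1 this.2
  · by_cases hne : Pe.Nonempty
    · rw [if_pos hne]
      have h1 : Pe.image g ⊆ {S} := fun x hx => Finset.mem_singleton.mpr (himgPe x hx)
      have h2 : (Pe.image g).Nonempty := hne.image g
      have := Finset.card_le_card h1
      have := Finset.card_pos.mpr h2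
      simp only [Finset.card_singleton] at *
      omega
    · rw [if_neg hne, Finset.not_nonempty_iff_eq_empty.mp hne]
      simp

theorem pv_count_filter_range (S : List Int) (x : Int) :
    ((Finset.range S.length).filter (fun i => S.getD i 0 = x)).card = S.count x := by
  induction S using List.reverseRecOn with
  | nil => simp
  | append_singleton T y ih =>
      have hpre : ∀ i, i < T.length → (T ++ [y]).getD i 0 = T.getD i 0 := fun i hi => by
        simp [List.getD_eq_getElem?_getD, List.getElem?_append_left hi]
      have hlast : (T ++ [y]).getD T.length 0 = y := by
        simp [List.getD_eq_getElem?_getD]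
      have hfe : (Finset.range T.length).filter (fun i => (T ++ [y]).getD i 0 = x)
          = (Finset.range T.length).filter (fun i => T.getD i 0 = x) :=
        Finset.filter_congr (fun i hi => by rw [hpre i (Finset.mem_range.mp hi)])
      rw [List.length_append, List.length_singleton, Finset.range_add_one, Finset.filter_insert,
        List.count_append, List.count_singleton, hlast]
      by_cases hy : y = x
      · rw [if_pos hy, Finset.card_insert_of_notMem (by simp), hfe, ih]
        simp [hy]
      · rw [if_neg hy, hfe, ih]
        simp [beq_iff_eq, hy]

theorem pv_dict_count (S : List Int) (v : Int) :
    (S.foldl (fun d v => d.insert v (d.getD v 0 + 1)) PySem.Dict.empty).getD v 0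
      = (S.count v : Int) := by
  induction S using List.reverseRecOn generalizing v with
  | nil => simp [PySem.Dict.getD_empty]
  | append_singleton T y ih =>
      rw [List.foldl_append, List.foldl_cons, List.foldl_nil, PySem.Dict.getD_insert,
        List.count_append, List.count_singleton]
      by_cases hv : v = y
      · rw [if_pos hv, hv, ih y]
        simp
      · rw [if_neg hv, ih v]
        simp [beq_iff_eq, Ne.symm hv]

theorem pv_eqc_append (T : List Int) (y : Int) :
    pvEqc (T ++ [y]) = pvEqc T + T.count y := by
  have hpre : ∀ i, i < T.length → (T ++ [y]).getD i 0 = T.getD i 0 := fun i hi => by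
    simp [List.getD_eq_getElem?_getD, List.getElem?_append_left hi]
  have hlast : (T ++ [y]).getD T.length 0 = y := by
    simp [List.getD_eq_getElem?_getD]
  unfold pvEqc
  rw [List.length_append, List.length_singleton, Finset.sum_range_succ]
  congr 1
  · refine Finset.sum_congr rfl ?_
    intro j hj
    rw [Finset.mem_range] at hj
    refine congrArg Finset.card (Finset.filter_congr ?_)
    intro i hi
    rw [Finset.mem_range] at hi
    rw [hpre i (by omega), hpre j hj]
  · rw [← pv_count_filter_range T y]
    refine congrArg Finset.card (Finset.filter_congr ?_)
    intro i hi
    rw [Finset.mem_range] at hi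
    rw [hpre i hi, hlast]

theorem pv_fold_B (S : List Int) :
    (PySem.List.enumerate S).foldl
      (fun (acc : Int × Int × PySem.Dict Int Int) jv =>
        (acc.1 + jv.1, acc.2.1 + acc.2.2.getD jv.2 0,
         acc.2.2.insert jv.2 (acc.2.2.getD jv.2 0 + 1)))
      (0, 0, PySem.Dict.empty)
      = (((∑ j ∈ Finset.range S.length, j : Nat) : Int), ((pvEqc S : Nat) : Int),
         (S.foldl (fun d v => d.insert v (d.getD v 0 + 1)) PySem.Dict.empty)) := by
  induction S using List.reverseRecOn with
  | nil => simp [pvEqc, PySem.List.enumerate_nil]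
  | append_singleton T y ih =>
      rw [PySem.List.enumerate_append, List.foldl_append, ih, PySem.List.enumerate_cons,
        PySem.List.enumerate_nil, List.foldl_cons, List.foldl_nil]
      simp only [Prod.mk.injEq]
      refine ⟨?_, ?_, ?_⟩
      · rw [List.length_append, List.length_singleton, Finset.sum_range_succ]
        push_cast
        ring
      · rw [pv_eqc_append, pv_dict_count]
        push_cast
        ring
      · rw [List.foldl_append, List.foldl_cons, List.foldl_nil]

theorem pv_slow_alt_eq (S : List Int) :
    slow_alt S = ((∑ j ∈ Finset.range S.length, j : Nat) : Int) - (pvEqc S : Int)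
      + (if (pvEqc S : Int) ≠ 0 then 1 else 0) := by
  unfold slow_alt
  rw [pv_fold_B]

-- ===== VERDICT (by name: the statement is the Claim_ definition above) =====
theorem slow_spec : Claim_equal_slow := by
  intro S _
  unfold Spec_slow
  rw [pv_slow_eq_card, pv_card_image, pv_slow_alt_eq]
  have hPe : ((pvPairs S).filter (fun p => S.getD p.1 0 = S.getD p.2 0)).card = pvEqc S :=
    pv_card_pairs S (fun i j => S.getD i 0 = S.getD j 0)
  have htot : ((pvPairs S).filter (fun p => S.getD p.1 0 ≠ S.getD p.2 0)).card + pvEqc S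
      = ∑ j ∈ Finset.range S.length, j := by
    rw [← hPe, pv_card_pairs S (fun i j => S.getD i 0 ≠ S.getD j 0),
      pv_card_pairs S (fun i j => S.getD i 0 = S.getD j 0), ← Finset.sum_add_distrib]
    refine Finset.sum_congr rfl ?_
    intro j _
    simp only [ne_eq]
    rw [add_comm, Finset.filter_card_add_filter_neg_card_eq_card]
    exact Finset.card_range j
  have hne_iff : ((pvPairs S).filter (fun p => S.getD p.1 0 = S.getD p.2 0)).Nonempty
      ↔ pvEqc S ≠ 0 := by
    rw [← Finset.card_pos, hPe]
    omega
  by_cases hcase : pvEqc S = 0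
  · rw [if_neg (fun h => (hne_iff.mp h) hcase), if_neg (by simp [hcase])]
    omega
  · rw [if_pos (hne_iff.mpr hcase), if_pos (by exact_mod_cast hcase)]
    omega
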